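-- pv_equiv track=rewrite | github.com/semmlerino/Shotbot | BB/shotbot/documentation_templates.py | _parse_raises
-- ===== SOURCE A (Python) =====
-- from typing import Any, Dict, List, Optional, Tuple
--
-- def _parse_raises(lines: List[str]) -> Dict[str, str]:
--     """Parse exception descriptions."""
--     raises = {}
--     current_exc = None
--     current_desc = []
--
--     for line in lines:
--         # Check if it's an exception definition
--         if ":" in line and not line.startswith(" "):
--             if current_exc:
--                 raises[current_exc] = " ".join(current_desc).strip()
--             parts = line.split(":", 1)
--             current_exc = parts[0].strip()
--             current_desc = [parts[1].strip()] if len(parts) > 1 else []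
--         elif current_exc:
--             current_desc.append(line.strip())
--
--     if current_exc:
--         raises[current_exc] = " ".join(current_desc).strip()
--
--     return raises
-- ===== SOURCE B (Python) =====
-- from typing import Dict, List
--
--
-- def _parse_raises(lines: List[str]) -> Dict[str, str]:
--     """Parse exception descriptions (two-pass: group by header lines, then map)."""
--     def is_hdr(l):
--         return ":" in l and not l.startswith(" ")
--
--     # Pass 1: partition into groups, each starting at a header line;
--     # lines before the first header are dropped.
--     groups = []
--     i, n = 0, len(lines)
--     while i < n and not is_hdr(lines[i]):
--         i += 1
--     while i < n:
--         j = i + 1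
--         while j < n and not is_hdr(lines[j]):
--             j += 1
--         groups.append((lines[i], lines[i + 1:j]))
--         i = j
--
--     # Pass 2: map each group to a (name, description) entry; later groups
--     # with the same name overwrite earlier ones.
--     raises = {}
--     for hdr, body in groups:
--         name, frag = hdr.split(":", 1)
--         name = name.strip()
--         if name:
--             raises[name] = " ".join([frag.strip()] + [l.strip() for l in body]).strip()
--     return raises
-- ===== Notes on version B (the rewrite author's own statement) =====
-- stated objective: alternative
-- what changed: Replaces A's flush-on-transition state machine (current exception + growing description accumulator, flushed on each new header and at the end) by two explicit passes: first partition the lines into header-led groups (dropping lines before the first header), then map each group independently to a dict entry.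
import Mathlib
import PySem

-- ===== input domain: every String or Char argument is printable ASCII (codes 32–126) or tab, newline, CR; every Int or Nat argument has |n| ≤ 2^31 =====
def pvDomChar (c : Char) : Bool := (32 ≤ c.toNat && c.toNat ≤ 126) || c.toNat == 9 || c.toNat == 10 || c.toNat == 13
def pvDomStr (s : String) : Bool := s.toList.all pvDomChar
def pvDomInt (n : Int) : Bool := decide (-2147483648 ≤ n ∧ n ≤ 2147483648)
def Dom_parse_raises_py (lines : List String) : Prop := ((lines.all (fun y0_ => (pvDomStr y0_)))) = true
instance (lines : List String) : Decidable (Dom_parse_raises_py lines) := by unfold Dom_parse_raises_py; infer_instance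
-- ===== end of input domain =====

-- B replaces A's flush-on-transition state machine by two passes (partition the lines
-- into header-led groups, then map each group to an entry); same cost, different decomposition.

-- ===== PORT A =====
-- A's state: (raises dict, current_exc, current_desc); Python's 'current_exc = None' and the
-- truthiness test 'if current_exc:' are modelled by the string "" (None and "" are both falsy,
-- and every assigned value is parts[0].strip(), a string).
-- 'line.split(":", 1)' always returns a (nonempty) list, so '(….getD [])' / 'parts.getD 0 ""' are exact.
def pvFlushA (st : PySem.Dict String String × String × List String) : PySem.Dict String String :=
  if st.2.1 ≠ "" then st.1.insert st.2.1 (PySem.Str.strip (PySem.Str.join " " st.2.2)) else st.1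

def pvStepA (st : PySem.Dict String String × String × List String) (line : String) :
    PySem.Dict String String × String × List String :=
  if PySem.Str.isIn ":" line && !(PySem.Str.startswith line " ") then
    let raises' := pvFlushA st
    let parts := (PySem.Str.splitMax? line ":" 1).getD []
    (raises', PySem.Str.strip (parts.getD 0 ""),
      if parts.length > 1 then [PySem.Str.strip (parts.getD 1 "")] else [])
  else if st.2.1 ≠ "" then (st.1, st.2.1, st.2.2 ++ [PySem.Str.strip line])
  else st

def parse_raises_py (lines : List String) : List (String × String) :=
  (pvFlushA (lines.foldl pvStepA (PySem.Dict.empty, "", []))).items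

-- ===== PORT B =====
def pvIsHdr (l : String) : Bool := PySem.Str.isIn ":" l && !(PySem.Str.startswith l " ")

-- Pass 1 of Source B: partition into header-led groups (header, body), dropping lines
-- before the first header (the leading skip loop and the inner body scan of Source B).
def pvGroupsB : List String → List (String × List String)
  | [] => []
  | l :: rest =>
    if pvIsHdr l then
      (l, rest.takeWhile (fun x => !pvIsHdr x)) :: pvGroupsB (rest.dropWhile (fun x => !pvIsHdr x))
    else pvGroupsB rest
termination_by ls => ls.length
decreasing_by
  · exact Nat.lt_succ_of_le (List.length_dropWhile_le _ _)
  · exact Nat.lt_succ_self _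

-- Pass 2 of Source B: one group to one dict entry ('hdr.split(":", 1)' has exactly two parts
-- on a header line, so 'parts.getD 0 ""' / 'parts.getD 1 ""' are exact).
def pvInsertGroup (d : PySem.Dict String String) (g : String × List String) :
    PySem.Dict String String :=
  let parts := (PySem.Str.splitMax? g.1 ":" 1).getD []
  let name := PySem.Str.strip (parts.getD 0 "")
  if name ≠ "" then
    d.insert name (PySem.Str.strip (PySem.Str.join " "
      (PySem.Str.strip (parts.getD 1 "") :: g.2.map PySem.Str.strip)))
  else d

def parse_raises_py_alt (lines : List String) : List (String × String) :=
  ((pvGroupsB lines).foldl pvInsertGroup PySem.Dict.empty).items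

-- ===== PRECONDITION & SPEC =====
def Spec_parse_raises_py (lines : List String) (out : List (String × String)) : Prop := out = parse_raises_py_alt lines
instance (lines : List String) (out : List (String × String)) : Decidable (Spec_parse_raises_py lines out) := by unfold Spec_parse_raises_py; infer_instance

-- ===== CLAIM (what is proved, stated in full; the proofs are below) =====
def Claim_equal_parse_raises_py : Prop := ∀ (lines : List String), Dom_parse_raises_py lines → Spec_parse_raises_py lines (parse_raises_py lines)

-- ===== LEMMAS AND PROOFS =====

theorem pvGroupsB_nil : pvGroupsB [] = [] := by rw [pvGroupsB]

theorem pvGroupsB_cons_hdr (l : String) (rest : List String) (h : pvIsHdr l = true) :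
    pvGroupsB (l :: rest) =
      (l, rest.takeWhile (fun x => !pvIsHdr x)) ::
        pvGroupsB (rest.dropWhile (fun x => !pvIsHdr x)) := by
  rw [pvGroupsB, if_pos h]

theorem pvGroupsB_cons_nonhdr (l : String) (rest : List String) (h : ¬ pvIsHdr l = true) :
    pvGroupsB (l :: rest) = pvGroupsB rest := by
  rw [pvGroupsB, if_neg h]

theorem pvStrip_space_cons (cs : List Char) :
    PySem.Chars.strip (' ' :: cs) = PySem.Chars.strip cs := by
  simp [PySem.Chars.strip, PySem.Chars.lstrip,
    show PySem.Chars.isspace ' ' = true from rfl]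

-- a leading empty piece disappears under the final strip
theorem pvStripJoinEmpty (ys : List String) :
    PySem.Str.strip (PySem.Str.join " " ("" :: ys)) = PySem.Str.strip (PySem.Str.join " " ys) := by
  cases ys with
  | nil => rfl
  | cons y t =>
    simp only [PySem.Str.strip, PySem.Str.join]
    congr 1
    have h : PySem.Chars.join " ".toList (List.map String.toList ("" :: y :: t)) =
        ' ' :: PySem.Chars.join " ".toList (List.map String.toList (y :: t)) := by
      simp [PySem.Chars.join, List.intercalate]
    simp only [List.map_cons] at h ⊢
    rw [show String.toList (String.ofList (PySem.Chars.join " ".toList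
      (String.toList "" :: String.toList y :: List.map String.toList t))) =
      PySem.Chars.join " ".toList (String.toList "" :: String.toList y :: List.map String.toList t)
      from by simp]
    rw [show (String.toList "" : List Char) = [] from rfl] at *
    rw [h, pvStrip_space_cons]
    simp

-- key step: flushing A's open header state (with the body lines appended, stripped)
-- is exactly B's pvInsertGroup on the group (l, body)
theorem pvEmit_eq_insertGroup (d : PySem.Dict String String) (l : String) (body : List String) :
    pvFlushA (d,
      PySem.Str.strip (((PySem.Str.splitMax? l ":" 1).getD []).getD 0 ""),
      (if ((PySem.Str.splitMax? l ":" 1).getD []).length > 1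
        then [PySem.Str.strip (((PySem.Str.splitMax? l ":" 1).getD []).getD 1 "")] else [])
        ++ body.map PySem.Str.strip) = pvInsertGroup d (l, body) := by
  by_cases hlen : 1 < ((PySem.Str.splitMax? l ":" 1).getD []).length
  · simp only [pvFlushA, pvInsertGroup, gt_iff_lt, if_pos hlen, List.singleton_append]
  · -- parts has a single piece: A joins body.map strip, B joins "" :: body.map strip;
    -- the leading "" is absorbed by the final strip
    have hp1 : ((PySem.Str.splitMax? l ":" 1).getD []).getD 1 "" = "" :=
      List.getD_eq_default _ _ (by omega)
    simp only [pvFlushA, pvInsertGroup, gt_iff_lt, if_neg hlen, List.nil_append]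
    rw [hp1, show PySem.Str.strip "" = "" from rfl, pvStripJoinEmpty]

set_option maxHeartbeats 400000 in
theorem pvMain (ls : List String) (d : PySem.Dict String String) (exc : String)
    (desc : List String) :
    pvFlushA (ls.foldl pvStepA (d, exc, desc)) =
      (pvGroupsB (ls.dropWhile (fun x => !pvIsHdr x))).foldl pvInsertGroup
        (pvFlushA (d, exc, desc ++ (ls.takeWhile (fun x => !pvIsHdr x)).map PySem.Str.strip)) := by
  induction ls generalizing d exc desc with
  | nil => simp [pvGroupsB_nil]
  | cons l ls ih =>
    by_cases h : pvIsHdr l = true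
    · rw [List.foldl_cons]
      have hstep : pvStepA (d, exc, desc) l =
          (pvFlushA (d, exc, desc),
            PySem.Str.strip (((PySem.Str.splitMax? l ":" 1).getD []).getD 0 ""),
            if ((PySem.Str.splitMax? l ":" 1).getD []).length > 1
              then [PySem.Str.strip (((PySem.Str.splitMax? l ":" 1).getD []).getD 1 "")]
              else []) := by
        simp only [pvStepA]
        rw [if_pos (by simpa [pvIsHdr] using h)]
      rw [hstep, ih]
      rw [List.takeWhile_cons_of_neg (by simp [h]), List.dropWhile_cons_of_neg (by simp [h])]
      rw [pvGroupsB_cons_hdr l ls h, List.foldl_cons]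
      rw [List.map_nil, List.append_nil desc, pvEmit_eq_insertGroup]
    · rw [List.foldl_cons]
      rw [List.takeWhile_cons_of_pos (by simp [h]), List.dropWhile_cons_of_pos (by simp [h])]
      by_cases hexc : exc = ""
      · have hstep : pvStepA (d, exc, desc) l = (d, exc, desc) := by
          simp only [pvStepA]
          rw [if_neg (by simpa [pvIsHdr] using h)]
          simp [hexc]
        rw [hstep, ih]
        subst hexc
        have hf : ∀ y : List String, pvFlushA (d, "", y) = d := fun y => rfl
        rw [hf, hf]
      · have hstep : pvStepA (d, exc, desc) l = (d, exc, desc ++ [PySem.Str.strip l]) := by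
          simp only [pvStepA]
          rw [if_neg (by simpa [pvIsHdr] using h)]
          simp [hexc]
        rw [hstep, ih]
        rw [List.map_cons, List.append_assoc desc [PySem.Str.strip l], List.singleton_append]

-- B skips leading non-header lines; pvGroupsB does the same, so the dropWhile is harmless
theorem pvGroupsB_dropWhile (ls : List String) :
    pvGroupsB (ls.dropWhile (fun x => !pvIsHdr x)) = pvGroupsB ls := by
  induction ls with
  | nil => rfl
  | cons l t ih =>
    by_cases h : pvIsHdr l = true
    · rw [List.dropWhile_cons_of_neg (by simp [h])]
    · rw [List.dropWhile_cons_of_pos (by simp [h]), ih, pvGroupsB_cons_nonhdr l t h]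

-- ===== VERDICT (by name: the statement is the Claim_ definition above) =====
theorem parse_raises_py_spec : Claim_equal_parse_raises_py := by
  intro lines _
  show parse_raises_py lines = parse_raises_py_alt lines
  unfold parse_raises_py parse_raises_py_alt
  rw [pvMain, pvGroupsB_dropWhile]
  have hf : ∀ y : List String, pvFlushA (PySem.Dict.empty, "", y) = PySem.Dict.empty :=
    fun y => rfl
  rw [hf]
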